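-- pv_equiv track=rewrite | github.com/milaS-07/harmony-GA | src/constraints.py | verify_triad
-- ===== SOURCE A (Python) =====
-- from collections import Counter
--
-- ALLOWED_TRIADS = [
--     [0,2,4],
--     [1,3,5],
--     [2,4,6],
--     [0,3,5],
--     [1,4,6],
--     [0,2,5],
--     [1,3,6]
-- ]
--
-- def verify_triad(moment: list, is_minor: bool):
--     steps_acc = [get_tone(t) for t in moment]
--
--     for tone, alteration in steps_acc:
--         if tone == 6:
--             if is_minor and alteration != 1:
--                 return False
--             elif not is_minor and alteration != 0:
--                 return False
--         else:
--             if alteration != 0: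
--                 return False
--
--     tones = [get_tone(tone)[0] for tone in moment]
--     tones_set = sorted(set(tones))
--
--     chord_idx = ALLOWED_TRIADS.index(tones_set)
--
--     counts = Counter(tones)
--     repeated_tones = [t for t, c in counts.items() if c == 2]
--     if len(repeated_tones) != 1:
--         return False
--     if any(c > 2 for c in counts.values()):
--         return False
--
--     repeated_tone = repeated_tones[0]
--     triad_step = get_triad_tone(repeated_tone, chord_idx)
--
--     bass_tone = get_tone(moment[3])[0]
--     bass_step = get_triad_tone(bass_tone, chord_idx)
--
--     if bass_step == 1:
--         if chord_idx in [0, 3, 4]: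
--             if triad_step not in [1, 5]:
--                 return False
--         elif chord_idx in [1, 2, 5]:
--             if triad_step not in [1, 3]:
--                 return False
--         else: #sedmi
--             if triad_step != 3:
--                 return False
--     elif bass_step == 3:
--         if chord_idx in [0, 3, 4]:
--             if triad_step not in [1, 5]:
--                 return False
--         elif chord_idx in [2, 5]:
--             if triad_step != 3:
--                 return False
--         elif chord_idx == 6:
--             if triad_step not in [3, 5]:
--                 return False
--     else:
--         if chord_idx in [0, 3, 4]:
--             if triad_step not in [1, 5]:
--                 return False
--         else:
--             if triad_step != 3:
--                 return False
--
--     return True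
--
-- def get_tone(tone: list):
--     return [tone[0] % 7, tone[1]]
--
-- def get_third_index(num: int):
--     if num <= 2:
--         return 1
--     elif 3 <= num <= 4:
--         return 2
--     else:  # 5 <= idx <= 6
--         return 0
--
-- def get_triad_tone(tone: int, chord_idx: int):
--     chord = ALLOWED_TRIADS[chord_idx]
--     third_idx = get_third_index(chord_idx)
--
--     if tone == chord[third_idx]:
--         return 3
--     elif tone == chord[(third_idx + 1) % 3]:
--         return 5
--     elif tone == chord[(third_idx - 1) % 3]:
--         return 1
-- ===== SOURCE B (Python) =====
-- def verify_triad(moment: list, is_minor: bool):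
--     # accidental check: every note natural except the raised 7th degree in minor
--     if any(t[1] != (1 if t[0] % 7 == 6 and is_minor else 0) for t in moment):
--         return False
--     tones = [t[0] % 7 for t in moment]
--     distinct = sorted(set(tones))
--     # the root of a stacked-thirds triad {r, r+2, r+4} (mod 7) is the unique
--     # member whose third and fifth are also present
--     root = next(r for r in distinct if (r + 2) % 7 in distinct and (r + 4) % 7 in distinct)
--     if len(tones) != 4:
--         return False
--     doubled = sum(tones) - sum(distinct)   # the one tone occurring twice
--     d = (doubled - root) % 7 + 1           # scale degree of the doubled tone: 1, 3 or 5
--     bass = (tones[3] - root) % 7 + 1       # scale degree of the bass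
--     if root in (0, 3, 4):
--         return d != 3
--     return d == 3 or (bass == 1 and d == 1 and root != 6) or (bass == 3 and (root == 1 or (d == 5 and root == 6)))
-- ===== Notes on version B (the rewrite author's own statement) =====
-- stated objective: simpler
-- what changed: B discards the ALLOWED_TRIADS table, list.index, Counter and get_triad_tone's positional-rotation lookup entirely: it finds the triad root arithmetically as the unique distinct tone whose third (r+2 mod 7) and fifth (r+4 mod 7) are also present, obtains the doubled tone as sum(tones)-sum(distinct), computes scale degrees by modular subtraction (t-root)%7+1, and collapses A's 18-branch doubling cascade into a single boolean formula over (root, doubled degree, bass degree).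
import Mathlib
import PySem

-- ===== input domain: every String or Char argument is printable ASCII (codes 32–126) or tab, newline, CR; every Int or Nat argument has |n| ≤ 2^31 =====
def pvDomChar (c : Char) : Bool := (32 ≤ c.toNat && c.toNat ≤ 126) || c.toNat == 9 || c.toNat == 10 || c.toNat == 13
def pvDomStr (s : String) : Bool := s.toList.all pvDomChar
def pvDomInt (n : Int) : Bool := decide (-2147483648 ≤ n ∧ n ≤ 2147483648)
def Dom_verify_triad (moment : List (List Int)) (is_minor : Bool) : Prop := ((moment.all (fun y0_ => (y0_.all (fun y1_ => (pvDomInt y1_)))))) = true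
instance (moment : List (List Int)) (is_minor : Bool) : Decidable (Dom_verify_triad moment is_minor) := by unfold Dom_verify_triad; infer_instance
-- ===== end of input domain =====

-- B drops the chord table and positional rotation entirely: it finds the triad's root
-- arithmetically (the member whose third and fifth mod 7 are also present), gets the
-- doubled tone as sum(tones) - sum(distinct), scale degrees by modular subtraction, and
-- replaces A's 18-branch cascade by one boolean formula (objective: simpler).

-- ===== PORT A =====
def ALLOWED_TRIADS : List (List Int) :=
  [[0,2,4],[1,3,5],[2,4,6],[0,3,5],[1,4,6],[0,2,5],[1,3,6]]

def get_tone (tone : List Int) : List Int :=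
  [PySem.Int.mod ((PySem.List.pyGet? tone 0).getD 0) 7, (PySem.List.pyGet? tone 1).getD 0]

def get_third_index (num : Int) : Int :=
  if num ≤ 2 then 1 else if 3 ≤ num ∧ num ≤ 4 then 2 else 0

def get_triad_tone (tone : Int) (chord_idx : Int) : Option Int :=
  let chord := (PySem.List.pyGet? ALLOWED_TRIADS chord_idx).getD []
  let third_idx := get_third_index chord_idx
  if tone = (PySem.List.pyGet? chord third_idx).getD 0 then some 3
  else if tone = (PySem.List.pyGet? chord (PySem.Int.mod (third_idx + 1) 3)).getD 0 then some 5
  else if tone = (PySem.List.pyGet? chord (PySem.Int.mod (third_idx - 1) 3)).getD 0 then some 1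
  else none

-- the 'for tone, alteration in steps_acc' early-return loop of A
def altLoopA (is_minor : Bool) : List (List Int) → Bool
  | [] => true
  | p :: rest =>
    let tone := (PySem.List.pyGet? p 0).getD 0
    let alteration := (PySem.List.pyGet? p 1).getD 0
    if tone = 6 then
      if is_minor = true ∧ alteration ≠ 1 then false
      else if is_minor = false ∧ alteration ≠ 0 then false
      else altLoopA is_minor rest
    else if alteration ≠ 0 then false
    else altLoopA is_minor rest

def verify_triad (moment : List (List Int)) (is_minor : Bool) : Bool :=
  let steps_acc := moment.map get_tone
  if altLoopA is_minor steps_acc = false then false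
  else
    let tones := moment.map (fun tone => (PySem.List.pyGet? (get_tone tone) 0).getD 0)
    let tones_set := PySem.List.sorted (PySem.Set.ofList tones) (fun x => x) false
    let chord_idx := (PySem.List.index? ALLOWED_TRIADS tones_set).getD 0
    let counts := PySem.Dict.counter tones
    let repeated_tones := (counts.items.filter (fun p => p.2 == 2)).map Prod.fst
    if repeated_tones.length ≠ 1 then false
    else if counts.values.any (fun c => decide (c > 2)) then false
    else
      let repeated_tone := (PySem.List.pyGet? repeated_tones 0).getD 0
      let triad_step := get_triad_tone repeated_tone chord_idx
      let bass_tone := (PySem.List.pyGet? (get_tone ((PySem.List.pyGet? moment 3).getD [])) 0).getD 0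
      let bass_step := get_triad_tone bass_tone chord_idx
      if bass_step = some 1 then
        if chord_idx = 0 ∨ chord_idx = 3 ∨ chord_idx = 4 then
          if ¬(triad_step = some 1 ∨ triad_step = some 5) then false else true
        else if chord_idx = 1 ∨ chord_idx = 2 ∨ chord_idx = 5 then
          if ¬(triad_step = some 1 ∨ triad_step = some 3) then false else true
        else if triad_step ≠ some 3 then false else true
      else if bass_step = some 3 then
        if chord_idx = 0 ∨ chord_idx = 3 ∨ chord_idx = 4 then
          if ¬(triad_step = some 1 ∨ triad_step = some 5) then false else true
        else if chord_idx = 2 ∨ chord_idx = 5 then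
          if triad_step ≠ some 3 then false else true
        else if chord_idx = 6 then
          if ¬(triad_step = some 3 ∨ triad_step = some 5) then false else true
        else true
      else
        if chord_idx = 0 ∨ chord_idx = 3 ∨ chord_idx = 4 then
          if ¬(triad_step = some 1 ∨ triad_step = some 5) then false else true
        else if triad_step ≠ some 3 then false else true

-- ===== PORT B =====
-- any(t[1] != (1 if t[0] % 7 == 6 and is_minor else 0) for t in moment)
def badAlt (is_minor : Bool) (t : List Int) : Bool :=
  (PySem.List.pyGet? t 1).getD 0 !=
    (if PySem.Int.mod ((PySem.List.pyGet? t 0).getD 0) 7 = 6 ∧ is_minor = true then 1 else 0)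

def verify_triad_alt (moment : List (List Int)) (is_minor : Bool) : Bool :=
  if moment.any (badAlt is_minor) then false
  else
    let tones := moment.map (fun t => PySem.Int.mod ((PySem.List.pyGet? t 0).getD 0) 7)
    let distinct := PySem.List.sorted (PySem.Set.ofList tones) (fun x => x) false
    -- next(r for r in distinct if (r+2)%7 in distinct and (r+4)%7 in distinct)
    let root := (distinct.find? (fun r =>
        distinct.contains (PySem.Int.mod (r + 2) 7) &&
        distinct.contains (PySem.Int.mod (r + 4) 7))).getD 0
    if tones.length ≠ 4 then false
    else
      let doubled := tones.sum - distinct.sum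
      let d := PySem.Int.mod (doubled - root) 7 + 1
      let bass := PySem.Int.mod (((PySem.List.pyGet? tones 3).getD 0) - root) 7 + 1
      if root = 0 ∨ root = 3 ∨ root = 4 then decide (d ≠ 3)
      else d == 3 || (bass == 1 && d == 1 && root != 6) || (bass == 3 && (root == 1 || (d == 5 && root == 6)))

-- ===== PRECONDITION & SPEC =====
-- helpers for Pre_: the tone and the alteration test of one chord note
def toneOf (t : List Int) : Int := PySem.Int.mod ((PySem.List.pyGet? t 0).getD 0) 7

def altOk (is_minor : Bool) (t : List Int) : Bool :=
  (PySem.List.pyGet? t 1).getD 0 == (if toneOf t = 6 then (if is_minor then 1 else 0) else 0)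

-- Pre_ excludes exactly the inputs where A raises: a note shorter than 2 entries
-- (IndexError in get_tone), and moments that pass the alteration check but whose
-- distinct tones are not one of the seven allowed triads (ValueError in list.index).
def Pre_verify_triad (moment : List (List Int)) (is_minor : Bool) : Prop :=
  (∀ t ∈ moment, 2 ≤ t.length) ∧
  (moment.all (altOk is_minor) = true →
    PySem.List.sorted (PySem.Set.ofList (moment.map toneOf)) (fun x => x) false ∈
      ([[0,2,4],[1,3,5],[2,4,6],[0,3,5],[1,4,6],[0,2,5],[1,3,6]] : List (List Int)))
instance (moment : List (List Int)) (is_minor : Bool) : Decidable (Pre_verify_triad moment is_minor) := by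
  unfold Pre_verify_triad; infer_instance

def pvWitness_verify_triad : List (List Int) × Bool := ([[0,0],[2,0],[4,0],[0,0]], false)

def Spec_verify_triad (moment : List (List Int)) (is_minor : Bool) (out : Bool) : Prop := out = verify_triad_alt moment is_minor
instance (moment : List (List Int)) (is_minor : Bool) (out : Bool) : Decidable (Spec_verify_triad moment is_minor out) := by unfold Spec_verify_triad; infer_instance

-- ===== CLAIM (what is proved, stated in full; the proofs are below) =====
def Claim_equal_verify_triad : Prop := ∀ (moment : List (List Int)) (is_minor : Bool), Dom_verify_triad moment is_minor → Pre_verify_triad moment is_minor → Spec_verify_triad moment is_minor (verify_triad moment is_minor)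

-- ===== LEMMAS AND PROOFS =====

theorem getTone_fst (t : List Int) : (PySem.List.pyGet? (get_tone t) 0).getD 0 = toneOf t := by
  simp [get_tone, toneOf, PySem.List.pyGet?, PySem.List.pyIdx?]

theorem getTone_snd (t : List Int) :
    (PySem.List.pyGet? (get_tone t) 1).getD 0 = (PySem.List.pyGet? t 1).getD 0 := by
  simp [get_tone, PySem.List.pyGet?, PySem.List.pyIdx?]

-- A's tail after the alteration loop, as a function of the tone list and the bass tone
def Apost (tones : List Int) (bt : Int) : Bool :=
  let tones_set := PySem.List.sorted (PySem.Set.ofList tones) (fun x => x) false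
  let chord_idx := (PySem.List.index? ALLOWED_TRIADS tones_set).getD 0
  let counts := PySem.Dict.counter tones
  let repeated_tones := (counts.items.filter (fun p => p.2 == 2)).map Prod.fst
  if repeated_tones.length ≠ 1 then false
  else if counts.values.any (fun c => decide (c > 2)) then false
  else
    let triad_step := get_triad_tone ((PySem.List.pyGet? repeated_tones 0).getD 0) chord_idx
    let bass_step := get_triad_tone bt chord_idx
    if bass_step = some 1 then
      if chord_idx = 0 ∨ chord_idx = 3 ∨ chord_idx = 4 then
        if ¬(triad_step = some 1 ∨ triad_step = some 5) then false else true
      else if chord_idx = 1 ∨ chord_idx = 2 ∨ chord_idx = 5 then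
        if ¬(triad_step = some 1 ∨ triad_step = some 3) then false else true
      else if triad_step ≠ some 3 then false else true
    else if bass_step = some 3 then
      if chord_idx = 0 ∨ chord_idx = 3 ∨ chord_idx = 4 then
        if ¬(triad_step = some 1 ∨ triad_step = some 5) then false else true
      else if chord_idx = 2 ∨ chord_idx = 5 then
        if triad_step ≠ some 3 then false else true
      else if chord_idx = 6 then
        if ¬(triad_step = some 3 ∨ triad_step = some 5) then false else true
      else true
    else
      if chord_idx = 0 ∨ chord_idx = 3 ∨ chord_idx = 4 then
        if ¬(triad_step = some 1 ∨ triad_step = some 5) then false else true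
      else if triad_step ≠ some 3 then false else true

-- B's tail after its alteration check, as a function of the tone list
def Bpost (tones : List Int) : Bool :=
  let distinct := PySem.List.sorted (PySem.Set.ofList tones) (fun x => x) false
  let root := (distinct.find? (fun r =>
      distinct.contains (PySem.Int.mod (r + 2) 7) &&
      distinct.contains (PySem.Int.mod (r + 4) 7))).getD 0
  if tones.length ≠ 4 then false
  else
    let doubled := tones.sum - distinct.sum
    let d := PySem.Int.mod (doubled - root) 7 + 1
    let bass := PySem.Int.mod (((PySem.List.pyGet? tones 3).getD 0) - root) 7 + 1
    if root = 0 ∨ root = 3 ∨ root = 4 then decide (d ≠ 3)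
    else d == 3 || (bass == 1 && d == 1 && root != 6) || (bass == 3 && (root == 1 || (d == 5 && root == 6)))

theorem altLoopA_eq (is_minor : Bool) (l : List (List Int)) :
    altLoopA is_minor (l.map get_tone) = l.all (altOk is_minor) := by
  induction l with
  | nil => rfl
  | cons t rest ih =>
    simp only [List.map_cons, altLoopA, List.all_cons, getTone_fst, getTone_snd, ih, altOk]
    cases is_minor <;> by_cases h6 : toneOf t = 6 <;>
      by_cases ha : (PySem.List.pyGet? t 1).getD 0 = 0 <;>
        by_cases hb : (PySem.List.pyGet? t 1).getD 0 = 1 <;>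
          simp [h6, ha, hb]

theorem badAlt_eq (is_minor : Bool) (t : List Int) : badAlt is_minor t = !(altOk is_minor t) := by
  simp only [badAlt, altOk, toneOf, bne, Bool.not_not]
  cases is_minor <;> by_cases h6 : PySem.Int.mod ((PySem.List.pyGet? t 0).getD 0) 7 = 6 <;>
    simp [h6]

theorem A_split (moment : List (List Int)) (is_minor : Bool) :
    verify_triad moment is_minor =
      if moment.all (altOk is_minor) then
        Apost (moment.map toneOf) (toneOf ((PySem.List.pyGet? moment 3).getD []))
      else false := by
  simp only [verify_triad, altLoopA_eq, Apost, getTone_fst]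
  cases moment.all (altOk is_minor) <;> simp

theorem B_split (moment : List (List Int)) (is_minor : Bool) :
    verify_triad_alt moment is_minor =
      if moment.all (altOk is_minor) then Bpost (moment.map toneOf) else false := by
  simp only [verify_triad_alt, Bpost, badAlt_eq, List.any_eq_not_all_not, Bool.not_not,
    List.all_eq_true]
  have : (moment.map (fun t => PySem.Int.mod ((PySem.List.pyGet? t 0).getD 0) 7)) =
      moment.map toneOf := rfl
  rw [this]
  by_cases hall : moment.all (altOk is_minor) = true <;>
    simp_all [List.all_eq_true]

-- the final cascade of A on a concrete triad, doubled tone and bass tone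
def Acasc (ts : List Int) (u bt : Int) : Bool :=
  let chord_idx := (PySem.List.index? ALLOWED_TRIADS ts).getD 0
  let triad_step := get_triad_tone u chord_idx
  let bass_step := get_triad_tone bt chord_idx
  if bass_step = some 1 then
    if chord_idx = 0 ∨ chord_idx = 3 ∨ chord_idx = 4 then
      if ¬(triad_step = some 1 ∨ triad_step = some 5) then false else true
    else if chord_idx = 1 ∨ chord_idx = 2 ∨ chord_idx = 5 then
      if ¬(triad_step = some 1 ∨ triad_step = some 3) then false else true
    else if triad_step ≠ some 3 then false else true
  else if bass_step = some 3 then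
    if chord_idx = 0 ∨ chord_idx = 3 ∨ chord_idx = 4 then
      if ¬(triad_step = some 1 ∨ triad_step = some 5) then false else true
    else if chord_idx = 2 ∨ chord_idx = 5 then
      if triad_step ≠ some 3 then false else true
    else if chord_idx = 6 then
      if ¬(triad_step = some 3 ∨ triad_step = some 5) then false else true
    else true
  else
    if chord_idx = 0 ∨ chord_idx = 3 ∨ chord_idx = 4 then
      if ¬(triad_step = some 1 ∨ triad_step = some 5) then false else true
    else if triad_step ≠ some 3 then false else true

-- B's arithmetic rule on a concrete triad, doubled tone and bass tone
def Bcore (ts : List Int) (u bt : Int) : Bool :=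
  let root := (ts.find? (fun r =>
      ts.contains (PySem.Int.mod (r + 2) 7) &&
      ts.contains (PySem.Int.mod (r + 4) 7))).getD 0
  let d := PySem.Int.mod (u - root) 7 + 1
  let bass := PySem.Int.mod (bt - root) 7 + 1
  if root = 0 ∨ root = 3 ∨ root = 4 then decide (d ≠ 3)
  else d == 3 || (bass == 1 && d == 1 && root != 6) || (bass == 3 && (root == 1 || (d == 5 && root == 6)))

-- the cascade and the arithmetic rule agree on every chord and pair of chord members
theorem fin_core : ∀ ts ∈ ALLOWED_TRIADS, ∀ u ∈ ts, ∀ bt ∈ ts, Acasc ts u bt = Bcore ts u bt := by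
  decide

-- A's repeated-tone list is the distinct tones counted exactly twice
theorem repeated_eq (tones : List Int) :
    (((PySem.Dict.counter tones).items.filter (fun p => p.2 == 2)).map Prod.fst) =
      (PySem.Set.ofList tones).filter (fun k => (tones.count k : Int) == 2) := by
  rw [PySem.Dict.items_counter, List.filter_map, List.map_map]
  simp [Function.comp_def]

theorem values_any_eq (tones : List Int) :
    ((PySem.Dict.counter tones).values.any (fun c => decide (c > 2))) =
      ((PySem.Set.ofList tones).any (fun k => decide ((tones.count k : Int) > 2))) := by
  simp only [PySem.Dict.values, PySem.Dict.items_counter, List.map_map, List.any_map]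
  rfl

-- length of a list whose members all lie in {a, b, c}
theorem length_eq_count_three (tones : List Int) (a b c : Int)
    (hab : a ≠ b) (hac : a ≠ c) (hbc : b ≠ c)
    (hmem : ∀ x ∈ tones, x = a ∨ x = b ∨ x = c) :
    tones.length = tones.count a + tones.count b + tones.count c := by
  induction tones with
  | nil => simp
  | cons x rest ih =>
    have hrest := ih (fun y hy => hmem y (List.mem_cons_of_mem _ hy))
    rcases hmem x List.mem_cons_self with h | h | h <;> subst h <;>
      simp [hab, hac, hbc, hab.symm, hac.symm, hbc.symm] <;> omega

theorem beq_cast_two (n : Nat) : ((n:Int) == 2) = (n == 2) := by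
  by_cases h : n = 2 <;> simp [h] <;> omega

theorem Apost_pass (tones : List Int) (bt u : Int) (ts : List Int)
    (hts : PySem.List.sorted (PySem.Set.ofList tones) (fun x => x) false = ts)
    (hfil : (PySem.Set.ofList tones).filter (fun k => (tones.count k : Int) == 2) = [u])
    (hany : (PySem.Set.ofList tones).any (fun k => decide ((tones.count k : Int) > 2)) = false) :
    Apost tones bt = Acasc ts u bt := by
  simp only [Apost, Acasc, repeated_eq, values_any_eq, hts, hfil, hany]
  simp [PySem.List.pyGet?, PySem.List.pyIdx?]

theorem Apost_fail (tones : List Int) (bt : Int)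
    (h : ¬(((PySem.Set.ofList tones).filter (fun k => (tones.count k : Int) == 2)).length = 1 ∧
        (PySem.Set.ofList tones).any (fun k => decide ((tones.count k : Int) > 2)) = false)) :
    Apost tones bt = false := by
  simp only [Apost, repeated_eq, values_any_eq]
  by_cases g1 : (List.filter (fun k => (List.count k tones : Int) == 2) (PySem.Set.ofList tones)).length = 1
  · have g2 : (List.any (PySem.Set.ofList tones) fun k => decide ((List.count k tones : Int) > 2)) = true := by
      rcases not_and_or.mp h with h1 | h2
      · exact absurd g1 h1
      · revert h2
        cases (List.any (PySem.Set.ofList tones) fun k => decide ((List.count k tones : Int) > 2)) <;> simp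
    rw [if_neg (not_not_intro g1), if_pos g2]
  · rw [if_pos g1]

theorem Bpost_fail (tones : List Int) (h : tones.length ≠ 4) : Bpost tones = false := by
  simp [Bpost, h]

theorem Bpost_pass (tones : List Int) (u : Int) (ts : List Int)
    (hts : PySem.List.sorted (PySem.Set.ofList tones) (fun x => x) false = ts)
    (hlen : tones.length = 4)
    (hsum : tones.sum - ts.sum = u) :
    Bpost tones = Bcore ts u ((PySem.List.pyGet? tones 3).getD 0) := by
  simp only [Bpost, Bcore, hts, hlen, hsum]
  simp

theorem post_eq_core (tones : List Int) (bt a b c : Int)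
    (hts : PySem.List.sorted (PySem.Set.ofList tones) (fun x => x) false = [a, b, c])
    (hlit : [a, b, c] ∈ ALLOWED_TRIADS)
    (hbt : tones.length = 4 → bt = (PySem.List.pyGet? tones 3).getD 0) :
    Apost tones bt = Bpost tones := by
  have hperm : (PySem.Set.ofList tones).Perm [a, b, c] :=
    hts ▸ (PySem.List.sorted_perm (PySem.Set.ofList tones) (fun x => x) false).symm
  have hnd : ([a, b, c] : List Int).Nodup := hperm.nodup (PySem.Set.nodup_ofList tones)
  have hab : a ≠ b := by simp at hnd; tauto
  have hac : a ≠ c := by simp at hnd; tauto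
  have hbc : b ≠ c := by simp at hnd; tauto
  have hmemiff : ∀ x, x ∈ tones ↔ (x = a ∨ x = b ∨ x = c) := by
    intro x
    rw [← PySem.Set.mem_ofList, hperm.mem_iff]; simp
  have hsum := length_eq_count_three tones a b c hab hac hbc (fun x hx => (hmemiff x).mp hx)
  have hca : 1 ≤ tones.count a := List.count_pos_iff.mpr ((hmemiff a).mpr (Or.inl rfl))
  have hcb : 1 ≤ tones.count b := List.count_pos_iff.mpr ((hmemiff b).mpr (Or.inr (Or.inl rfl)))
  have hcc : 1 ≤ tones.count c := List.count_pos_iff.mpr ((hmemiff c).mpr (Or.inr (Or.inr rfl)))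
  have hfilp : ((PySem.Set.ofList tones).filter (fun k => (tones.count k : Int) == 2)).Perm
      (([a, b, c] : List Int).filter (fun k => (tones.count k : Int) == 2)) :=
    hperm.filter _
  have hanyeq : ((PySem.Set.ofList tones).any (fun k => decide ((tones.count k : Int) > 2))) =
      (([a, b, c] : List Int).any (fun k => decide ((tones.count k : Int) > 2))) :=
    hperm.any_eq
  by_cases hlen : tones.length = 4
  · -- the moment is the three chord tones with exactly one doubled
    have h4 : tones.count a + tones.count b + tones.count c = 4 := by omega
    have hany : ((PySem.Set.ofList tones).any (fun k => decide ((tones.count k : Int) > 2))) = false := by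
      rw [hanyeq]; simp; omega
    have hbt' := hbt hlen
    have hg3 : PySem.List.pyGet? tones 3 = some tones[3] := by
      have := PySem.List.pyGet?_ofNat tones 3 (by omega)
      exact_mod_cast this
    have hbtm : bt ∈ tones := by
      rw [hbt', hg3]
      exact List.getElem_mem _
    have hbtabc : bt ∈ ([a, b, c] : List Int) := by
      simpa using (hmemiff bt).mp hbtm
    have main : ∀ u : Int, u ∈ ([a, b, c] : List Int) → tones.count u = 2 →
        (([a, b, c] : List Int).filter (fun k => (tones.count k : Int) == 2)) = [u] →
        tones.sum = u + (a + b + c) →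
        Apost tones bt = Bpost tones := by
      intro u hu hcu hflit hsumtones
      have hfil : (PySem.Set.ofList tones).filter (fun k => (tones.count k : Int) == 2) = [u] :=
        List.perm_singleton.mp (hflit ▸ hfilp)
      rw [Apost_pass tones bt u [a, b, c] hts hfil hany,
          Bpost_pass tones u [a, b, c] hts hlen (by simp [hsumtones]; ring), ← hbt']
      exact fin_core [a, b, c] hlit u hu bt hbtabc
    have hcases : (tones.count a = 2 ∧ tones.count b = 1 ∧ tones.count c = 1) ∨
        (tones.count a = 1 ∧ tones.count b = 2 ∧ tones.count c = 1) ∨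
        (tones.count a = 1 ∧ tones.count b = 1 ∧ tones.count c = 2) := by
      have hle2 : tones.count a ≤ 2 ∧ tones.count b ≤ 2 ∧ tones.count c ≤ 2 := by
        by_contra h
        push_neg at h
        -- any count ≥ 3 forces another count 0, contradicting membership
        omega
      omega
    have hsum_of : ∀ u v w : Int, tones.count u = 2 → tones.count v = 1 → tones.count w = 1 →
        u ≠ v → u ≠ w → v ≠ w → (∀ x, x ∈ tones ↔ (x = u ∨ x = v ∨ x = w)) →
        tones.sum = u + u + v + w := by
      intro u v w hu hv hw huv huw hvw hmem
      have hperm2 : tones.Perm [u, u, v, w] := by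
        rw [List.perm_iff_count]
        intro x
        by_cases hx1 : x = u
        · subst hx1
          simp [List.count_cons, hu, Ne.symm huv, Ne.symm huw]
        · by_cases hx2 : x = v
          · subst hx2
            simp [List.count_cons, hv, Ne.symm hx1, Ne.symm hvw]
          · by_cases hx3 : x = w
            · subst hx3
              simp [List.count_cons, hw, Ne.symm hx1, Ne.symm hx2]
            · have hnin : x ∉ tones := fun hin => by
                rcases (hmem x).mp hin with h | h | h <;> tauto
              simp [List.count_cons, List.count_eq_zero.mpr hnin,
                Ne.symm hx1, Ne.symm hx2, Ne.symm hx3]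
      rw [hperm2.sum_eq, List.sum_cons, List.sum_cons, List.sum_cons, List.sum_cons,
        List.sum_nil]
      ring
    rcases hcases with ⟨e1, e2, e3⟩ | ⟨e1, e2, e3⟩ | ⟨e1, e2, e3⟩
    · refine main a (by simp) e1
        (by simp only [List.filter_cons, List.filter_nil, e1, e2, e3]; norm_num) ?_
      rw [hsum_of a b c e1 e2 e3 hab hac hbc (fun x => hmemiff x)]; ring
    · refine main b (by simp) e2
        (by simp only [List.filter_cons, List.filter_nil, e1, e2, e3]; norm_num) ?_
      rw [hsum_of b a c e2 e1 e3 hab.symm hbc hac (fun x => by rw [hmemiff x]; tauto)]; ring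
    · refine main c (by simp) e3
        (by simp only [List.filter_cons, List.filter_nil, e1, e2, e3]; norm_num) ?_
      rw [hsum_of c a b e3 e1 e2 hac.symm hbc.symm hab (fun x => by rw [hmemiff x]; tauto)]; ring
  · rw [Bpost_fail tones hlen, Apost_fail tones bt]
    rintro ⟨h1, h2⟩
    rw [hanyeq] at h2
    have hle2 : tones.count a ≤ 2 ∧ tones.count b ≤ 2 ∧ tones.count c ≤ 2 := by
      simp at h2; omega
    rw [hfilp.length_eq] at h1
    by_cases e1 : tones.count a = 2 <;> by_cases e2 : tones.count b = 2 <;>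
      by_cases e3 : tones.count c = 2 <;>
        simp only [List.filter_cons, List.filter_nil, beq_cast_two, e1, e2, e3,
          beq_self_eq_true, if_true] at h1 <;>
        simp [e1, e2, e3] at h1 <;> omega

theorem post_eq (tones : List Int) (bt : Int)
    (hset : PySem.List.sorted (PySem.Set.ofList tones) (fun x => x) false ∈
      ([[0,2,4],[1,3,5],[2,4,6],[0,3,5],[1,4,6],[0,2,5],[1,3,6]] : List (List Int)))
    (hbt : tones.length = 4 → bt = (PySem.List.pyGet? tones 3).getD 0) :
    Apost tones bt = Bpost tones := by
  simp only [List.mem_cons, List.not_mem_nil, or_false] at hset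
  rcases hset with h | h | h | h | h | h | h <;>
    exact post_eq_core tones bt _ _ _ h (by decide) hbt

-- ===== VERDICT (by name: the statement is the Claim_ definition above) =====
theorem verify_triad_spec : Claim_equal_verify_triad := by
  intro moment is_minor _hdom hpre
  unfold Spec_verify_triad
  rw [A_split, B_split]
  by_cases hall : moment.all (altOk is_minor) = true
  · rw [if_pos hall, if_pos hall]
    refine post_eq _ _ (hpre.2 hall) ?_
    intro hlen
    have hm : moment.length = 4 := by simpa using hlen
    have h1 : PySem.List.pyGet? moment 3 = some moment[3] := by
      have := PySem.List.pyGet?_ofNat moment 3 (by omega)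
      exact_mod_cast this
    have h2 : PySem.List.pyGet? (moment.map toneOf) 3 = some (toneOf moment[3]) := by
      have h3 : (3 : Nat) < (moment.map toneOf).length := by simpa using (by omega : 3 < moment.length)
      have := PySem.List.pyGet?_ofNat (moment.map toneOf) 3 h3
      simpa using this
    rw [h1, h2]
    rfl
  · rw [if_neg hall, if_neg hall]
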